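-- pv_equiv track=rewrite | github.com/mbtiongson1/gaia-skill-tree | src/gaia_cli/promotion.py | _meets_evidence_floor
-- ===== SOURCE A (Python) =====
-- EVIDENCE_FLOOR = {
--     "0": None,
--     "I": None,
--     "II": {"C", "B", "A"},
--     "III": {"B", "A"},
--     "IV": {"B", "A"},
--     "V": {"B", "A"},
--     "VI": {"A"},
-- }
--
-- def _meets_evidence_floor(graph_skill: dict, target_level: str) -> bool:
--     """Check whether the graph skill has evidence meeting the floor for target_level."""
--     required_classes = EVIDENCE_FLOOR.get(target_level)
--     if required_classes is None:
--         return True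
--     evidence_list = graph_skill.get("evidence", [])
--     for ev in evidence_list:
--         if ev.get("class") in required_classes:
--             return True
--     return False
-- ===== SOURCE B (Python) =====
-- # Evidence classes are totally ordered (A > B > C > everything else), and each
-- # floor set is exactly "class rank >= threshold": so compare the best evidence
-- # rank seen against a per-level numeric threshold instead of set membership.
-- _CLASS_RANK = {"A": 3, "B": 2, "C": 1}
-- _FLOOR_RANK = {"II": 1, "III": 2, "IV": 2, "V": 2, "VI": 3}
--
-- def _meets_evidence_floor(graph_skill: dict, target_level: str) -> bool:
--     need = _FLOOR_RANK.get(target_level, 0)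
--     if need == 0:
--         return True
--     best = 0
--     for ev in graph_skill.get("evidence", []):
--         best = max(best, _CLASS_RANK.get(ev.get("class"), 0))
--     return best >= need
-- ===== Notes on version B (the rewrite author's own statement) =====
-- stated objective: alternative
-- what changed: Exploits that the floor sets are nested along the total class order A>B>C: replaces the set-membership scan with a numeric rank table, a max-fold over the evidence computing the best class rank, and a single threshold comparison per level.
import Mathlib
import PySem

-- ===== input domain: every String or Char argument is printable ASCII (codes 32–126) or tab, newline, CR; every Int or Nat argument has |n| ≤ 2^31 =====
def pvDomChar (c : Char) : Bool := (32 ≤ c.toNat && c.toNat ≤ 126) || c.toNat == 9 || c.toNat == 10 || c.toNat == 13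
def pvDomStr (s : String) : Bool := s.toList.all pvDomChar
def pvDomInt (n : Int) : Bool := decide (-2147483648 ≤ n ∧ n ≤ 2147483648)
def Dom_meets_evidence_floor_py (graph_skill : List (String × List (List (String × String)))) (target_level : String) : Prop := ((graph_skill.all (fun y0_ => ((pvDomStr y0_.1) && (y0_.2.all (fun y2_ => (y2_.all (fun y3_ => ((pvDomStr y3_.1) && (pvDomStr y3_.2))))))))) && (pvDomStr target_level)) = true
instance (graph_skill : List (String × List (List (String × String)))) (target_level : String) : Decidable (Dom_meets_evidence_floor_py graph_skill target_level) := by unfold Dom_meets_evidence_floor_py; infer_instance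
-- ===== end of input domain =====

-- B exploits that the floor sets are nested along the total class order A>B>C:
-- a numeric rank table, a max-fold over the evidence, and one threshold
-- comparison replace A's set-membership scan with early return (objective: alternative).

-- ===== PORT A =====
-- EVIDENCE_FLOOR module constant; values are Python sets (PySem.Set String) or None.
def evidenceFloorTable : PySem.Dict String (Option (PySem.Set String)) :=
  PySem.Dict.mk [("0", none), ("I", none),
   ("II", some (PySem.Set.ofList ["C", "B", "A"])),
   ("III", some (PySem.Set.ofList ["B", "A"])),
   ("IV", some (PySem.Set.ofList ["B", "A"])),
   ("V", some (PySem.Set.ofList ["B", "A"])),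
   ("VI", some (PySem.Set.ofList ["A"]))]

-- A's for-loop with early return: scan the evidence list item by item.
def floorLoopA (evs : List (List (String × String))) (req : PySem.Set String) : Bool :=
  match evs with
  | [] => false
  | ev :: rest =>
    -- 'ev.get("class") in required_classes' (None is never in a set of strings)
    let hit : Bool := match PySem.Dict.get? (PySem.Dict.mk ev) "class" with
        | some c => PySem.Set.contains req c
        | none => false
    if hit then true
    else floorLoopA rest req

def meets_evidence_floor_py (graph_skill : List (String × List (List (String × String)))) (target_level : String) : Bool :=
  -- EVIDENCE_FLOOR.get(target_level): None for a missing key or a None value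
  match (PySem.Dict.get? evidenceFloorTable target_level).join with
  | none => true
  | some required_classes =>
    floorLoopA (PySem.Dict.getD (PySem.Dict.mk graph_skill) "evidence" []) required_classes

-- ===== PORT B =====
-- _CLASS_RANK and _FLOOR_RANK module constants of Source B.
def classRankTable : PySem.Dict String Int :=
  PySem.Dict.mk [("A", 3), ("B", 2), ("C", 1)]
def floorRankTable : PySem.Dict String Int :=
  PySem.Dict.mk [("II", 1), ("III", 2), ("IV", 2), ("V", 2), ("VI", 3)]

-- _CLASS_RANK.get(ev.get("class"), 0): a missing "class" key gives None, which
-- matches no string key, hence the default 0.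
def classRankOf (ev : List (String × String)) : Int :=
  match PySem.Dict.get? (PySem.Dict.mk ev) "class" with
  | some c => PySem.Dict.getD classRankTable c 0
  | none => 0

def meets_evidence_floor_py_alt (graph_skill : List (String × List (List (String × String)))) (target_level : String) : Bool :=
  let need := PySem.Dict.getD floorRankTable target_level 0
  if need == 0 then true
  else
    let best := (PySem.Dict.getD (PySem.Dict.mk graph_skill) "evidence" []).foldl
      (fun best ev => max best (classRankOf ev)) 0
    best ≥ need

-- ===== PRECONDITION & SPEC =====
def Spec_meets_evidence_floor_py (graph_skill : List (String × List (List (String × String)))) (target_level : String) (out : Bool) : Prop := out = meets_evidence_floor_py_alt graph_skill target_level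
instance (graph_skill : List (String × List (List (String × String)))) (target_level : String) (out : Bool) : Decidable (Spec_meets_evidence_floor_py graph_skill target_level out) := by unfold Spec_meets_evidence_floor_py; infer_instance

-- ===== CLAIM (what is proved, stated in full; the proofs are below) =====
def Claim_equal_meets_evidence_floor_py : Prop := ∀ (graph_skill : List (String × List (List (String × String)))) (target_level : String), Dom_meets_evidence_floor_py graph_skill target_level → Spec_meets_evidence_floor_py graph_skill target_level (meets_evidence_floor_py graph_skill target_level)

-- ===== LEMMAS AND PROOFS =====

-- The max-fold reaches the threshold iff the seed does or some element's rank does.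
theorem foldl_max_ge (evs : List (List (String × String))) (b need : Int) :
    (need ≤ evs.foldl (fun best ev => max best (classRankOf ev)) b) ↔
      need ≤ b ∨ ∃ ev ∈ evs, need ≤ classRankOf ev := by
  induction evs generalizing b with
  | nil => simp
  | cons ev rest ih =>
    simp only [List.foldl_cons, ih, le_max_iff, List.mem_cons]
    constructor
    · rintro ((h | h) | ⟨e, he, h⟩)
      · exact Or.inl h
      · exact Or.inr ⟨ev, Or.inl rfl, h⟩
      · exact Or.inr ⟨e, Or.inr he, h⟩
    · rintro (h | ⟨e, (rfl | he), h⟩)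
      · exact Or.inl (Or.inl h)
      · exact Or.inl (Or.inr h)
      · exact Or.inr ⟨e, he, h⟩

-- A's scan hits iff some evidence item's class is in the required set.
theorem floorLoopA_eq_true_iff (evs : List (List (String × String))) (req : PySem.Set String) :
    floorLoopA evs req = true ↔
      ∃ ev ∈ evs, ∃ c, PySem.Dict.get? (PySem.Dict.mk ev) "class" = some c ∧
        PySem.Set.contains req c = true := by
  induction evs with
  | nil => simp [floorLoopA]
  | cons ev rest ih =>
    rw [show floorLoopA (ev :: rest) req =
        (if (match PySem.Dict.get? (PySem.Dict.mk ev) "class" with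
             | some c => PySem.Set.contains req c
             | none => false) then true else floorLoopA rest req) from rfl]
    cases h : PySem.Dict.get? (PySem.Dict.mk ev) "class" with
    | none =>
      simp only [Bool.false_eq_true, if_false, ih, List.mem_cons]
      constructor
      · rintro ⟨e, he, c, hg, hc⟩; exact ⟨e, Or.inr he, c, hg, hc⟩
      · rintro ⟨e, (rfl | he), c, hg, hc⟩
        · simp [h] at hg
        · exact ⟨e, he, c, hg, hc⟩
    | some c =>
      by_cases hm : PySem.Set.contains req c = true
      · simp only [hm, if_true, true_iff]
        exact ⟨ev, List.mem_cons_self, c, h, hm⟩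
      · simp only [Bool.not_eq_true] at hm
        simp only [hm, Bool.false_eq_true, if_false, ih, List.mem_cons]
        constructor
        · rintro ⟨e, he, c', hg, hc'⟩; exact ⟨e, Or.inr he, c', hg, hc'⟩
        · rintro ⟨e, (rfl | he), c', hg, hc'⟩
          · rw [h] at hg; injection hg with hg'; rw [hg'] at hm; rw [hm] at hc'; cases hc'
          · exact ⟨e, he, c', hg, hc'⟩

-- Membership in a concrete floor set coincides with reaching its rank threshold.
theorem bridge (req : PySem.Set String) (need : Int)
    (hb : ∀ c : String, PySem.Set.contains req c = true ↔ need ≤ PySem.Dict.getD classRankTable c 0)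
    (evs : List (List (String × String))) (hneed : 1 ≤ need) :
    floorLoopA evs req =
      decide (need ≤ evs.foldl (fun best ev => max best (classRankOf ev)) 0) := by
  rw [Bool.eq_iff_iff, floorLoopA_eq_true_iff, decide_eq_true_iff, foldl_max_ge]
  constructor
  · rintro ⟨ev, hev, c, hg, hc⟩
    refine Or.inr ⟨ev, hev, ?_⟩
    unfold classRankOf; rw [hg]; exact (hb c).mp hc
  · rintro (h | ⟨ev, hev, h⟩)
    · omega
    · unfold classRankOf at h
      cases hg : PySem.Dict.get? (PySem.Dict.mk ev) "class" with
      | none =>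
        rw [hg] at h
        have h0 : need ≤ 0 := h
        exact absurd h0 (by omega)
      | some c => rw [hg] at h; exact ⟨ev, hev, c, hg, (hb c).mpr h⟩

-- ===== VERDICT (by name: the statement is the Claim_ definition above) =====
theorem meets_evidence_floor_py_spec : Claim_equal_meets_evidence_floor_py := by
  intro gs t _
  unfold Spec_meets_evidence_floor_py meets_evidence_floor_py meets_evidence_floor_py_alt
  by_cases h0 : t = "0"
  · subst h0; rfl
  by_cases h1 : t = "I"
  · subst h1; rfl
  by_cases h2 : t = "II"
  · subst h2
    simp only [show (PySem.Dict.get? evidenceFloorTable "II").join =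
        some (PySem.Set.ofList ["C", "B", "A"]) from rfl,
      show PySem.Dict.getD floorRankTable "II" 0 = 1 from rfl]
    exact bridge _ 1 (by
      intro c
      by_cases hA : c = "A"
      · subst hA; decide
      by_cases hB : c = "B"
      · subst hB; decide
      by_cases hC : c = "C"
      · subst hC; decide
      simp [PySem.Set.contains, classRankTable, PySem.Dict.getD, PySem.Dict.get?,
        hA, hB, hC, Ne.symm hA, Ne.symm hB, Ne.symm hC]) _ (by omega)
  by_cases h3 : t = "III"
  · subst h3
    simp only [show (PySem.Dict.get? evidenceFloorTable "III").join =
        some (PySem.Set.ofList ["B", "A"]) from rfl,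
      show PySem.Dict.getD floorRankTable "III" 0 = 2 from rfl]
    exact bridge _ 2 (by
      intro c
      by_cases hA : c = "A"
      · subst hA; decide
      by_cases hB : c = "B"
      · subst hB; decide
      by_cases hC : c = "C"
      · subst hC; decide
      simp [PySem.Set.contains, classRankTable, PySem.Dict.getD, PySem.Dict.get?,
        hA, hB, hC, Ne.symm hA, Ne.symm hB, Ne.symm hC]) _ (by omega)
  by_cases h4 : t = "IV"
  · subst h4
    simp only [show (PySem.Dict.get? evidenceFloorTable "IV").join =
        some (PySem.Set.ofList ["B", "A"]) from rfl,
      show PySem.Dict.getD floorRankTable "IV" 0 = 2 from rfl]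
    exact bridge _ 2 (by
      intro c
      by_cases hA : c = "A"
      · subst hA; decide
      by_cases hB : c = "B"
      · subst hB; decide
      by_cases hC : c = "C"
      · subst hC; decide
      simp [PySem.Set.contains, classRankTable, PySem.Dict.getD, PySem.Dict.get?,
        hA, hB, hC, Ne.symm hA, Ne.symm hB, Ne.symm hC]) _ (by omega)
  by_cases h5 : t = "V"
  · subst h5
    simp only [show (PySem.Dict.get? evidenceFloorTable "V").join =
        some (PySem.Set.ofList ["B", "A"]) from rfl,
      show PySem.Dict.getD floorRankTable "V" 0 = 2 from rfl]
    exact bridge _ 2 (by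
      intro c
      by_cases hA : c = "A"
      · subst hA; decide
      by_cases hB : c = "B"
      · subst hB; decide
      by_cases hC : c = "C"
      · subst hC; decide
      simp [PySem.Set.contains, classRankTable, PySem.Dict.getD, PySem.Dict.get?,
        hA, hB, hC, Ne.symm hA, Ne.symm hB, Ne.symm hC]) _ (by omega)
  by_cases h6 : t = "VI"
  · subst h6
    simp only [show (PySem.Dict.get? evidenceFloorTable "VI").join =
        some (PySem.Set.ofList ["A"]) from rfl,
      show PySem.Dict.getD floorRankTable "VI" 0 = 3 from rfl]
    exact bridge _ 3 (by
      intro c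
      by_cases hA : c = "A"
      · subst hA; decide
      by_cases hB : c = "B"
      · subst hB; decide
      by_cases hC : c = "C"
      · subst hC; decide
      simp [PySem.Set.contains, classRankTable, PySem.Dict.getD, PySem.Dict.get?,
        hA, hB, hC, Ne.symm hA, Ne.symm hB, Ne.symm hC]) _ (by omega)
  -- catch-all: not one of the seven keys — both lookups miss
  have hA : PySem.Dict.get? evidenceFloorTable t = none := by
    simp [evidenceFloorTable, PySem.Dict.get?, Ne.symm h0, Ne.symm h1, Ne.symm h2,
      Ne.symm h3, Ne.symm h4, Ne.symm h5, Ne.symm h6]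
  have hB : PySem.Dict.getD floorRankTable t 0 = 0 := by
    simp [floorRankTable, PySem.Dict.getD, PySem.Dict.get?, Ne.symm h2, Ne.symm h3,
      Ne.symm h4, Ne.symm h5, Ne.symm h6]
  rw [hA, hB]
  rfl
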